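-- pv_equiv track=rewrite | github.com/devery59/Programmers | Lv2/택배상자.py | solution
-- ===== SOURCE A (Python) =====
-- def solution(order):
--     cnt = 0
--     sub_container = []
--     index = 1
--     while index < len(order)+1:
--         sub_container.append(index)
--         while sub_container and sub_container[-1] == order[cnt]:
--             cnt += 1
--             sub_container.pop()
--         index+=1
--     return cnt
-- ===== SOURCE B (Python) =====
-- def solution(order):
--     n = len(order)
--     stack = []
--     nxt = 1
--     cnt = 0
--     for want in order:
--         while (not stack or stack[-1] != want) and nxt <= n:
--             stack.append(nxt)
--             nxt += 1
--         if stack and stack[-1] == want: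
--             stack.pop()
--             cnt += 1
--         else:
--             break
--     return cnt
-- ===== Notes on version B (the rewrite author's own statement) =====
-- stated objective: alternative
-- what changed: B inverts the loop nesting: instead of A's eager outer loop over push indices with an inner pop loop, B iterates over each demanded box and lazily pushes indices from a pointer until the demand is on top (popping it) or pushes are exhausted (breaking early).
import Mathlib
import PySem

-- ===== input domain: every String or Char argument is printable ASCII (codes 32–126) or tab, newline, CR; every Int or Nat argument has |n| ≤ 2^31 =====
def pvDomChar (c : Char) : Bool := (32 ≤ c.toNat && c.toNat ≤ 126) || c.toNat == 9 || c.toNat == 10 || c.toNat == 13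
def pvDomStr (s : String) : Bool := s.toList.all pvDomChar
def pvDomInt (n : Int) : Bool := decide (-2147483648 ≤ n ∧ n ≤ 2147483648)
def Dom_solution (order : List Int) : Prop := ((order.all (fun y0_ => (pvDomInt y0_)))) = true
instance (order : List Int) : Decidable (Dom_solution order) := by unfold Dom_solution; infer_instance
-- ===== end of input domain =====

-- B drives the simulation from each demanded box (lazy pushes, early break) instead of
-- A's eager push of every index with an inner pop loop: a different decomposition, same cost.

-- ===== PORT A =====
-- A's stack 'sub_container' is represented top-first (Python's last element = Lean head).
-- inner 'while sub_container and sub_container[-1] == order[cnt]' loop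
def innerA (order : List Int) : Int → List Int → Int × List Int
  | cnt, [] => (cnt, [])
  | cnt, top :: rest =>
    if PySem.List.pyGet? order cnt = some top then innerA order (cnt + 1) rest
    else (cnt, top :: rest)

-- outer 'while index < len(order)+1' loop: index runs over range(1, len(order)+1)
def solution (order : List Int) : Int :=
  ((PySem.List.pyRange 1 ((order.length : Int) + 1) 1).foldl
    (fun st idx => innerA order st.1 (idx :: st.2)) (0, ([] : List Int))).1

-- ===== PORT B =====
-- 'while (not stack or stack[-1] != want) and nxt <= n: stack.append(nxt); nxt += 1'
def pushUntil (want n : Int) (stack : List Int) (nxt : Int) : List Int × Int :=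
  if h : stack.head? ≠ some want ∧ nxt ≤ n then
    pushUntil want n (nxt :: stack) (nxt + 1)
  else (stack, nxt)
termination_by (n + 1 - nxt).toNat
decreasing_by omega

-- 'for want in order' loop with the early break
def goB (n : Int) : List Int → Int → List Int → Int → Int
  | [], cnt, _, _ => cnt
  | want :: rest, cnt, stack, nxt =>
    match pushUntil want n stack nxt with
    | (top :: stail, nxt') => if top = want then goB n rest (cnt + 1) stail nxt' else cnt
    | ([], _) => cnt

def solution_alt (order : List Int) : Int :=
  goB (order.length : Int) order 0 [] 1

-- ===== PRECONDITION & SPEC =====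
def Spec_solution (order : List Int) (out : Int) : Prop := out = solution_alt order
instance (order : List Int) (out : Int) : Decidable (Spec_solution order out) := by unfold Spec_solution; infer_instance

-- ===== CLAIM (what is proved, stated in full; the proofs are below) =====
def Claim_equal_solution : Prop := ∀ (order : List Int), Dom_solution order → Spec_solution order (solution order)

-- ===== LEMMAS AND PROOFS =====

-- proof-side rephrasing of A's outer loop: m remaining indices, next index nxt
def runA (order : List Int) : Int → List Int → Int → Nat → Int
  | cnt, _, _, 0 => cnt
  | cnt, stack, nxt, m + 1 =>
    let p := innerA order cnt (nxt :: stack)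
    runA order p.1 p.2 (nxt + 1) m

-- A's inner loop leaves a state whose top no longer matches order[cnt]
def stable (order : List Int) (cnt : Int) (stack : List Int) : Prop :=
  match stack with
  | [] => True
  | top :: _ => PySem.List.pyGet? order cnt ≠ some top

lemma drop_nil_of_pyGet?_none (order : List Int) (cnt : Int) (hc : 0 ≤ cnt)
    (h : PySem.List.pyGet? order cnt = none) : order.drop cnt.toNat = [] := by
  rw [PySem.List.pyGet?_of_nonneg order hc] at h
  exact List.drop_eq_nil_of_le (by simpa [List.getElem?_eq_none_iff] using h)

lemma lt_of_pyGet?_some (order : List Int) (cnt w : Int) (hc : 0 ≤ cnt)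
    (h : PySem.List.pyGet? order cnt = some w) : cnt.toNat < order.length := by
  by_contra hge
  rw [PySem.List.pyGet?_of_nonneg order hc, List.getElem?_eq_none (by omega)] at h
  simp at h

lemma drop_cons_of_pyGet?_some (order : List Int) (cnt w : Int) (hc : 0 ≤ cnt)
    (h : PySem.List.pyGet? order cnt = some w) :
    order.drop cnt.toNat = w :: order.drop (cnt.toNat + 1) := by
  have hlt := lt_of_pyGet?_some order cnt w hc h
  have hget : order[cnt.toNat] = w := by
    rw [PySem.List.pyGet?_of_nonneg order hc, List.getElem?_eq_getElem hlt] at h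
    exact Option.some.inj h
  exact hget ▸ List.drop_eq_getElem_cons hlt

lemma innerA_stable (order : List Int) : ∀ (stack : List Int) (cnt : Int),
    stable order (innerA order cnt stack).1 (innerA order cnt stack).2 := by
  intro stack
  induction stack with
  | nil => intro cnt; simp [innerA, stable]
  | cons top rest ih =>
    intro cnt
    by_cases h : PySem.List.pyGet? order cnt = some top
    · simpa [innerA, h] using ih (cnt + 1)
    · simp [innerA, h, stable]

lemma innerA_nonneg (order : List Int) : ∀ (stack : List Int) (cnt : Int),
    0 ≤ cnt → 0 ≤ (innerA order cnt stack).1 := by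
  intro stack
  induction stack with
  | nil => intro cnt h; simpa [innerA] using h
  | cons top rest ih =>
    intro cnt h
    by_cases hm : PySem.List.pyGet? order cnt = some top
    · simpa [innerA, hm] using ih (cnt + 1) (by omega)
    · simpa [innerA, hm] using h

-- goB absorbs A's inner pop loop (pushUntil does zero pushes while the top matches)
lemma goB_absorb (order : List Int) (n nxt : Int) : ∀ (stack : List Int) (cnt : Int),
    0 ≤ cnt →
    goB n (order.drop cnt.toNat) cnt stack nxt =
      goB n (order.drop (innerA order cnt stack).1.toNat)
        (innerA order cnt stack).1 (innerA order cnt stack).2 nxt := by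
  intro stack
  induction stack with
  | nil => intro cnt _; simp [innerA]
  | cons top rest ih =>
    intro cnt hc
    by_cases h : PySem.List.pyGet? order cnt = some top
    · have hdrop := drop_cons_of_pyGet?_some order cnt top hc h
      have hnat : (cnt + 1).toNat = cnt.toNat + 1 := by omega
      rw [hdrop]
      have hpush : pushUntil top n (top :: rest) nxt = (top :: rest, nxt) := by
        rw [pushUntil]; simp
      simp only [goB, hpush, if_true]
      rw [← hnat]
      simpa [innerA, h] using ih (cnt + 1) (by omega)
    · simp [innerA, h]

lemma main_lemma (order : List Int) : ∀ (m : Nat) (cnt : Int) (stack : List Int),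
    0 ≤ cnt → stable order cnt stack →
    runA order cnt stack ((order.length : Int) - m + 1) m =
      goB (order.length : Int) (order.drop cnt.toNat) cnt stack
        ((order.length : Int) - m + 1) := by
  intro m
  induction m with
  | zero =>
    intro cnt stack hc hs
    have hz : ((order.length : Int) - ((0 : Nat) : Int) + 1) = (order.length : Int) + 1 := by
      push_cast; ring
    rw [hz]
    cases hd : order.drop cnt.toNat with
    | nil => simp [runA, goB]
    | cons w rest =>
      -- no pushes possible (nxt = n+1 > n), and the top does not match: B breaks with cnt
      have hlt : cnt.toNat < order.length := by
        by_contra hge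
        rw [List.drop_eq_nil_of_le (by omega)] at hd
        simp at hd
      have hget : PySem.List.pyGet? order cnt = some w := by
        have h1 := List.drop_eq_getElem_cons hlt (l := order)
        rw [hd] at h1
        injection h1 with h1a _
        rw [PySem.List.pyGet?_of_nonneg order hc, List.getElem?_eq_getElem hlt, h1a]
      have hpush : pushUntil w (order.length : Int) stack ((order.length : Int) + 1)
          = (stack, (order.length : Int) + 1) := by
        rw [pushUntil]
        have hno : ¬ ((order.length : Int) + 1 ≤ (order.length : Int)) := by omega
        simp [hno]
      cases stack with
      | nil => simp [runA, goB, hpush]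
      | cons top stail =>
        have hne : top ≠ w := by
          intro he; exact hs (he ▸ hget)
        simp [runA, goB, hpush, hne]
  | succ m ih =>
    intro cnt stack hc hs
    have hcast : ((order.length : Int) - ((m + 1 : Nat) : Int) + 1)
        = (order.length : Int) - (m : Int) := by push_cast; ring
    rw [hcast]
    have hle : (order.length : Int) - (m : Int) ≤ (order.length : Int) := by omega
    cases hget : PySem.List.pyGet? order cnt with
    | none =>
      -- cnt has consumed all wants: A pushes uselessly, B has no wants left
      have hdrop := drop_nil_of_pyGet?_none order cnt hc hget
      have hstep : innerA order cnt (((order.length : Int) - (m : Int)) :: stack)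
          = (cnt, ((order.length : Int) - (m : Int)) :: stack) := by
        simp [innerA, hget]
      simp only [runA, hstep]
      rw [ih cnt (((order.length : Int) - (m : Int)) :: stack) hc (by simp [stable, hget])]
      rw [hdrop]
      simp [goB]
    | some w =>
      have hdrop := drop_cons_of_pyGet?_some order cnt w hc hget
      by_cases hw : w = (order.length : Int) - (m : Int)
      · -- serve: A pushes nxt and the inner loop pops it (and possibly more)
        subst hw
        have hstep : innerA order cnt (((order.length : Int) - (m : Int)) :: stack)
            = innerA order (cnt + 1) stack := by
          simp [innerA, hget]
        have htopne : stack.head? ≠ some ((order.length : Int) - (m : Int)) := by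
          cases stack with
          | nil => simp
          | cons top stail =>
            simp only [List.head?_cons, ne_eq, Option.some.injEq]
            intro he; exact hs (he ▸ hget)
        have hpush : pushUntil ((order.length : Int) - (m : Int)) (order.length : Int) stack
              ((order.length : Int) - (m : Int))
            = (((order.length : Int) - (m : Int)) :: stack,
               (order.length : Int) - (m : Int) + 1) := by
          rw [pushUntil]
          simp only [ne_eq, htopne, not_false_eq_true, hle, and_self, dite_true]
          rw [pushUntil]
          simp
        have hnat : (cnt + 1).toNat = cnt.toNat + 1 := by omega
        simp only [runA]
        rw [hstep]
        rw [ih (innerA order (cnt + 1) stack).1 (innerA order (cnt + 1) stack).2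
            (innerA_nonneg order stack (cnt + 1) (by omega)) (innerA_stable order stack (cnt + 1))]
        rw [hdrop]
        simp only [goB, hpush]
        rw [← hnat,
          goB_absorb order (order.length : Int) ((order.length : Int) - (m : Int) + 1)
            stack (cnt + 1) (by omega)]
        simp
      · -- mismatch: A keeps the pushed nxt; B also pushes nxt and re-enters its while
        have hne : PySem.List.pyGet? order cnt ≠ some ((order.length : Int) - (m : Int)) := by
          rw [hget]; intro he; exact hw (Option.some.inj he)
        have hstep : innerA order cnt (((order.length : Int) - (m : Int)) :: stack)
            = (cnt, ((order.length : Int) - (m : Int)) :: stack) := by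
          simp [innerA, hne]
        have hs' : stable order cnt (((order.length : Int) - (m : Int)) :: stack) := hne
        simp only [runA]
        rw [hstep]
        rw [ih cnt (((order.length : Int) - (m : Int)) :: stack) hc hs']
        rw [hdrop]
        have htopne : stack.head? ≠ some w := by
          cases stack with
          | nil => simp
          | cons top stail =>
            simp only [List.head?_cons, ne_eq, Option.some.injEq]
            intro he; exact hs (he ▸ hget)
        have hpush : pushUntil w (order.length : Int) stack ((order.length : Int) - (m : Int))
            = pushUntil w (order.length : Int)
                (((order.length : Int) - (m : Int)) :: stack)
                ((order.length : Int) - (m : Int) + 1) := by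
          rw [pushUntil]
          simp [htopne, hle]
        simp only [goB, hpush]

lemma foldA_eq (order : List Int) : ∀ (m : Nat) (a : Int) (st : Int × List Int),
    ((PySem.List.pyRange a (a + m) 1).foldl
      (fun st idx => innerA order st.1 (idx :: st.2)) st).1 =
    runA order st.1 st.2 a m := by
  intro m
  induction m with
  | zero =>
    intro a st
    rw [show a + ((0 : Nat) : Int) = a by omega, PySem.List.pyRange_one_eq_nil le_rfl]
    simp [runA]
  | succ m ih =>
    intro a st
    rw [PySem.List.pyRange_one_cons (by push_cast; omega),
      show a + ((m + 1 : Nat) : Int) = (a + 1) + (m : Int) by omega]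
    simp only [List.foldl_cons, runA]
    exact ih (a + 1) (innerA order st.1 (a :: st.2))

-- ===== VERDICT (by name: the statement is the Claim_ definition above) =====
theorem solution_spec : Claim_equal_solution := by
  unfold Claim_equal_solution
  intro order _
  unfold Spec_solution solution solution_alt
  have h1 : ((order.length : Int) + 1) = 1 + ((order.length : Nat) : Int) := by push_cast; ring
  rw [h1, foldA_eq order order.length 1 (0, [])]
  have h2 : (order.length : Int) - ((order.length : Nat) : Int) + 1 = 1 := by push_cast; ring
  have hm := main_lemma order order.length 0 [] le_rfl trivial
  rw [h2] at hm
  simpa using hm
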